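-- pv_equiv track=rewrite | github.com/ben5736/Algorithms | python/problems/str_compression.py | delete_helper
-- ===== SOURCE A (Python) =====
-- def delete_helper(ref, cover, i):
--   cur = 0
--   for j in range(len(cover)):
--     seg = cover[j]
--     start, end = seg
--     length = end - start
--     if i >= cur + length:
--       cur += length
--     else:  # i in current seg
--       ret = []
--       i_pos = i - cur + start
--       new_end = i_pos
--       new_start = i_pos + 1
--       if new_end > start:
--         ret.append((start, new_end))
--       if end > new_start:
--         ret.append((new_start, end))
--       return j, ret
-- ===== SOURCE B (Python) =====
-- def delete_helper(ref, cover, i):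
--     # Phase 1: prefix sums of segment lengths.
--     P = []
--     t = 0
--     for s, e in cover:
--         t += e - s
--         P.append(t)
--     # Phase 2: scan backwards; j ends up as the least index with i < P[j].
--     j = None
--     for k in range(len(P) - 1, -1, -1):
--         if i < P[k]:
--             j = k
--     if j is None:
--         return None  # i beyond every cumulative length (A falls through too)
--     # Phase 3: split segment j around the in-segment position.
--     s, e = cover[j]
--     pos = i - (P[j - 1] if j > 0 else 0) + s
--     ret = [(a, b) for a, b in ((s, pos), (pos + 1, e)) if b > a]
--     return j, ret
-- ===== Notes on version B (the rewrite author's own statement) =====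
-- stated objective: alternative
-- what changed: A's single accumulating scan that splits inside the loop is replaced by three separate phases: build a prefix-sum array of segment lengths, locate the containing segment by a backward scan that keeps the least index whose cumulative length exceeds i, then split that segment outside the loop.
import Mathlib
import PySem

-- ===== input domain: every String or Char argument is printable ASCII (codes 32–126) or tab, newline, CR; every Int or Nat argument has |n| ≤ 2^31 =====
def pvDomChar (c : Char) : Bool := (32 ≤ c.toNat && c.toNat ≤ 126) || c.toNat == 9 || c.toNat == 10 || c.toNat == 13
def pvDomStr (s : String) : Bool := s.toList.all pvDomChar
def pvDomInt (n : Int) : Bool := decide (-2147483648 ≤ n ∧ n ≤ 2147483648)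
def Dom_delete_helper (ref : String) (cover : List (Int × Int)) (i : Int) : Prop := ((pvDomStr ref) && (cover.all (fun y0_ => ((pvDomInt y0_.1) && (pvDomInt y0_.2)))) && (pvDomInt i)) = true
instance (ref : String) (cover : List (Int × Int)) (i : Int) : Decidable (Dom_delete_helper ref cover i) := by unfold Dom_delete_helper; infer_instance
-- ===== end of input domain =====

-- B replaces A's accumulating scan-with-inline-split by three phases — prefix-sum
-- array, backward search for the containing segment, then the split — an
-- alternative decomposition of the same O(n) job (no speed claim).

-- ===== PORT A =====
-- loop over cover carrying the running offset `cur` and index `j`; the trailing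
-- `(0, [])` is Python's fall-through `return None`, excluded by Pre_.
def dhGoA (i : Int) : Int → Int → List (Int × Int) → Int × (List (Int × Int))
  | _, _, [] => (0, [])
  | j, cur, (s, e) :: rest =>
    let len := e - s
    if cur + len ≤ i then
      dhGoA i (j + 1) (cur + len) rest
    else
      let ipos := i - cur + s
      (j, (if ipos > s then [(s, ipos)] else []) ++ (if e > ipos + 1 then [(ipos + 1, e)] else []))

def delete_helper (ref : String) (cover : List (Int × Int)) (i : Int) : Int × (List (Int × Int)) :=
  dhGoA i 0 0 cover

-- ===== PORT B =====
-- Phase 1 of Source B: running prefix sums of segment lengths.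
def dhPrefix : List (Int × Int) → Int → List Int
  | [], _ => []
  | (s, e) :: rest, t => (t + (e - s)) :: dhPrefix rest (t + (e - s))

-- Phase 2 of Source B: `for k in range(len(P)-1, -1, -1)` with last-write-wins `j`;
-- the counter n means "indices n-1, n-2, …, 0 remain to process".
def dhBack (P : List Int) (i : Int) : Nat → Option Nat → Option Nat
  | 0, j => j
  | n + 1, j => dhBack P i n (if i < P.getD n 0 then some n else j)

def delete_helper_alt (ref : String) (cover : List (Int × Int)) (i : Int) : Int × (List (Int × Int)) :=
  let P := dhPrefix cover 0
  match dhBack P i P.length none with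
  | none => (0, [])  -- Python's `return None`, excluded by Pre_
  | some j =>
    let se := cover.getD j (0, 0)
    let pos := i - (if j > 0 then P.getD (j - 1) 0 else 0) + se.1
    ((j : Int), ([(se.1, pos), (pos + 1, se.2)].filter (fun p => p.2 > p.1)))

-- ===== PRECONDITION & SPEC =====
-- Pre_ admits exactly the inputs on which Python A returns a value: some cumulative
-- segment length exceeds i (otherwise A's loop falls through and returns None,
-- which is not a value of the declared pair type; B returns None there too).
def Pre_delete_helper (ref : String) (cover : List (Int × Int)) (i : Int) : Prop :=
  ∃ k < cover.length, i < ((cover.take (k + 1)).map (fun p => p.2 - p.1)).sum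
instance (ref : String) (cover : List (Int × Int)) (i : Int) : Decidable (Pre_delete_helper ref cover i) := by unfold Pre_delete_helper; infer_instance

def pvWitness_delete_helper : String × (List (Int × Int)) × Int := ("ab", [(0, 2)], 1)

def Spec_delete_helper (ref : String) (cover : List (Int × Int)) (i : Int) (out : Int × (List (Int × Int))) : Prop := out = delete_helper_alt ref cover i
instance (ref : String) (cover : List (Int × Int)) (i : Int) (out : Int × (List (Int × Int))) : Decidable (Spec_delete_helper ref cover i out) := by unfold Spec_delete_helper; infer_instance

-- ===== CLAIM (what is proved, stated in full; the proofs are below) =====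
def Claim_equal_delete_helper : Prop := ∀ (ref : String) (cover : List (Int × Int)) (i : Int), Dom_delete_helper ref cover i → Pre_delete_helper ref cover i → Spec_delete_helper ref cover i (delete_helper ref cover i)

-- ===== LEMMAS AND PROOFS =====

def sumLen (l : List (Int × Int)) : Int := (l.map (fun p => p.2 - p.1)).sum

-- the common split of segment `se` at absolute position `pos`
def mkRet (se : Int × Int) (pos : Int) : List (Int × Int) :=
  (if pos > se.1 then [(se.1, pos)] else []) ++ (if se.2 > pos + 1 then [(pos + 1, se.2)] else [])

-- index of the first segment whose cumulative length (from offset cur) exceeds i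
def firstHit (i : Int) : Int → List (Int × Int) → Option Nat
  | _, [] => none
  | cur, (s, e) :: rest =>
    if i < cur + (e - s) then some 0 else (firstHit i (cur + (e - s)) rest).map (· + 1)

lemma sumLen_nil : sumLen [] = 0 := rfl
lemma sumLen_cons (p : Int × Int) (l : List (Int × Int)) :
    sumLen (p :: l) = (p.2 - p.1) + sumLen l := by simp [sumLen]

lemma dhPrefix_length : ∀ (l : List (Int × Int)) (t : Int), (dhPrefix l t).length = l.length
  | [], _ => rfl
  | (s, e) :: rest, t => by simp [dhPrefix, dhPrefix_length rest]

lemma dhPrefix_getD : ∀ (l : List (Int × Int)) (t : Int) (k : Nat), k < l.length →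
    (dhPrefix l t).getD k 0 = t + sumLen (l.take (k + 1))
  | [], _, k, h => by simp at h
  | (s, e) :: rest, t, 0, _ => by simp [dhPrefix, sumLen_cons, sumLen_nil]
  | (s, e) :: rest, t, k + 1, h => by
    simp only [List.length_cons, Nat.add_lt_add_iff_right] at h
    simp only [dhPrefix, List.getD_cons_succ, List.take_succ_cons, sumLen_cons]
    rw [dhPrefix_getD rest _ k h]; ring

-- A's loop computes firstHit and splits the segment it finds.
lemma goA_eq (i : Int) : ∀ (rest : List (Int × Int)) (j cur : Int),
    dhGoA i j cur rest =
      match firstHit i cur rest with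
      | none => (0, [])
      | some k => (j + (k : Int), mkRet (rest.getD k (0, 0)) (i - (cur + sumLen (rest.take k)) + (rest.getD k (0, 0)).1))
  | [], j, cur => by simp [dhGoA, firstHit]
  | (s, e) :: rest, j, cur => by
    by_cases h : i < cur + (e - s)
    · have hnle : ¬ (cur + (e - s) ≤ i) := by omega
      simp [dhGoA, firstHit, h, hnle, mkRet, sumLen_nil]
    · have hle : cur + (e - s) ≤ i := by omega
      simp only [dhGoA, if_pos hle, firstHit, if_neg h]
      rw [goA_eq i rest (j + 1) (cur + (e - s))]
      cases hfh : firstHit i (cur + (e - s)) rest with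
      | none => simp
      | some k =>
        simp only [Option.map_some, List.getD_cons_succ, List.take_succ_cons, sumLen_cons]
        rw [Prod.mk.injEq]
        constructor
        · push_cast; ring
        · congr 1; ring

-- the least index < n at which i < P.getD k 0
def least? (P : List Int) (i : Int) : Nat → Option Nat
  | 0 => none
  | n + 1 =>
    match least? P i n with
    | some k => some k
    | none => if i < P.getD n 0 then some n else none

lemma dhBack_eq (P : List Int) (i : Int) : ∀ (n : Nat) (j : Option Nat),
    dhBack P i n j = match least? P i n with | some k => some k | none => j
  | 0, j => rfl
  | n + 1, j => by
    rw [dhBack, dhBack_eq P i n]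
    cases hl : least? P i n with
    | some k => simp only [least?, hl]
    | none =>
      simp only [least?, hl]
      by_cases h : i < P.getD n 0
      · simp only [if_pos h]
      · simp only [if_neg h]

lemma least?_hit (P : List Int) (i : Int) : ∀ n k, least? P i n = some k →
    k < n ∧ i < P.getD k 0
  | 0, k, h => by simp [least?] at h
  | n + 1, k, h => by
    rw [least?] at h
    cases hl : least? P i n with
    | some k' =>
      rw [hl] at h
      obtain ⟨h1, h2⟩ := least?_hit P i n k' hl
      cases h; exact ⟨by omega, h2⟩
    | none =>
      rw [hl] at h
      by_cases hp : i < P.getD n 0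
      · rw [if_pos hp] at h; cases h; exact ⟨by omega, hp⟩
      · rw [if_neg hp] at h; cases h

lemma least?_none (P : List Int) (i : Int) : ∀ n, least? P i n = none ↔ ∀ k < n, ¬ i < P.getD k 0
  | 0 => by simp [least?]
  | n + 1 => by
    cases hl : least? P i n with
    | some k' =>
      obtain ⟨h1, h2⟩ := least?_hit P i n k' hl
      simp only [least?, hl]
      constructor
      · intro h; exact absurd h (by simp)
      · intro h; exact absurd h2 (h k' (by omega))
    | none =>
      have hall := (least?_none P i n).1 hl
      simp only [least?, hl]
      by_cases hp : i < P.getD n 0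
      · simp only [if_pos hp]
        constructor
        · intro h; exact absurd h (by simp)
        · intro h; exact absurd hp (h n (by omega))
      · simp only [if_neg hp]
        constructor
        · intro _ k hk
          rcases Nat.lt_succ_iff_lt_or_eq.1 hk with hk' | rfl
          · exact hall k hk'
          · exact hp
        · intro _; trivial

lemma least?_some (P : List Int) (i : Int) : ∀ n k, least? P i n = some k →
    k < n ∧ i < P.getD k 0 ∧ ∀ m < k, ¬ i < P.getD m 0
  | 0, k, h => by simp [least?] at h
  | n + 1, k, h => by
    rw [least?] at h
    cases hl : least? P i n with
    | some k' =>
      rw [hl] at h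
      obtain ⟨h1, h2, h3⟩ := least?_some P i n k' hl
      cases h; exact ⟨by omega, h2, h3⟩
    | none =>
      rw [hl] at h
      by_cases hp : i < P.getD n 0
      · rw [if_pos hp] at h; cases h
        exact ⟨by omega, hp, (least?_none P i n).1 hl⟩
      · rw [if_neg hp] at h; cases h

lemma firstHit_none (i : Int) : ∀ (l : List (Int × Int)) (cur : Int),
    firstHit i cur l = none ↔ ∀ k < l.length, ¬ i < cur + sumLen (l.take (k + 1))
  | [], cur => by simp [firstHit]
  | (s, e) :: rest, cur => by
    by_cases h : i < cur + (e - s)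
    · simp only [firstHit, if_pos h]
      constructor
      · intro hc; exact absurd hc (by simp)
      · intro hc
        exact absurd (hc 0 (by simp)) (by simpa [sumLen_cons, sumLen_nil] using h)
    · simp only [firstHit, if_neg h, Option.map_eq_none_iff]
      rw [firstHit_none i rest (cur + (e - s))]
      constructor
      · intro hall k hk
        match k with
        | 0 => simpa [sumLen_cons, sumLen_nil] using h
        | k + 1 =>
          have := hall k (by simpa using hk)
          simpa [sumLen_cons] using by omega
      · intro hall k hk
        have := hall (k + 1) (by simpa using hk)
        simp only [List.take_succ_cons, sumLen_cons] at this
        omega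

lemma firstHit_some (i : Int) : ∀ (l : List (Int × Int)) (cur : Int) (k : Nat),
    firstHit i cur l = some k →
    k < l.length ∧ i < cur + sumLen (l.take (k + 1)) ∧ ∀ m < k, ¬ i < cur + sumLen (l.take (m + 1))
  | [], cur, k, h => by simp [firstHit] at h
  | (s, e) :: rest, cur, k, h => by
    by_cases hp : i < cur + (e - s)
    · simp only [firstHit, if_pos hp] at h
      cases h
      exact ⟨by simp, by simpa [sumLen_cons, sumLen_nil] using hp, by omega⟩
    · simp only [firstHit, if_neg hp, Option.map_eq_some_iff] at h
      obtain ⟨k', hk', rfl⟩ := h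
      obtain ⟨h1, h2, h3⟩ := firstHit_some i rest (cur + (e - s)) k' hk'
      refine ⟨by simpa using h1, by simpa [sumLen_cons] using by omega, ?_⟩
      intro m hm
      match m with
      | 0 => simpa [sumLen_cons, sumLen_nil] using hp
      | m + 1 =>
        have := h3 m (by omega)
        simp only [List.take_succ_cons, sumLen_cons]
        omega

-- the two search phases find the same (unique least) index
lemma least?_eq_firstHit (cover : List (Int × Int)) (i : Int) :
    least? (dhPrefix cover 0) i cover.length = firstHit i 0 cover := by
  have hgetD : ∀ k < cover.length, (dhPrefix cover 0).getD k 0 = sumLen (cover.take (k + 1)) := by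
    intro k hk; rw [dhPrefix_getD cover 0 k hk]; ring
  cases hl : least? (dhPrefix cover 0) i cover.length with
  | none =>
    have hall := (least?_none _ _ _).1 hl
    cases hf : firstHit i 0 cover with
    | none => rfl
    | some k =>
      obtain ⟨h1, h2, _⟩ := firstHit_some i cover 0 k hf
      exact absurd (by rw [hgetD k h1]; simpa using h2) (hall k h1)
  | some k =>
    obtain ⟨h1, h2, h3⟩ := least?_some _ _ _ _ hl
    rw [hgetD k h1] at h2
    cases hf : firstHit i 0 cover with
    | none =>
      exact absurd (by simpa using h2) ((firstHit_none i cover 0).1 hf k h1)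
    | some k' =>
      obtain ⟨h1', h2', h3'⟩ := firstHit_some i cover 0 k' hf
      rcases Nat.lt_trichotomy k k' with hlt | rfl | hlt
      · exact absurd (by simpa using h2) (h3' k hlt)
      · rfl
      · have := h3 k' (by omega)
        rw [hgetD k' h1'] at this
        exact absurd (by simpa using h2') this

lemma filter_two (a b c d : Int) :
    ([((a : Int), b), (c, d)].filter (fun p => p.2 > p.1)) =
      (if b > a then [(a, b)] else []) ++ (if d > c then [(c, d)] else []) := by
  by_cases h1 : a < b <;> by_cases h2 : c < d <;>
    simp [List.filter, h1, h2, gt_iff_lt]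

-- ===== VERDICT (by name: the statement is the Claim_ definition above) =====
theorem delete_helper_spec : Claim_equal_delete_helper := by
  intro ref cover i _ hpre
  unfold Spec_delete_helper delete_helper delete_helper_alt
  obtain ⟨k, hk, hik⟩ := hpre
  have hik' : i < 0 + sumLen (cover.take (k + 1)) := by simpa [sumLen] using hik
  have hfh : ∃ k0, firstHit i 0 cover = some k0 := by
    cases hf : firstHit i 0 cover with
    | none => exact absurd hik' ((firstHit_none i cover 0).1 hf k hk)
    | some k0 => exact ⟨k0, rfl⟩
  obtain ⟨k0, hf⟩ := hfh
  have hb : dhBack (dhPrefix cover 0) i (dhPrefix cover 0).length none = some k0 := by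
    rw [dhPrefix_length, dhBack_eq, least?_eq_firstHit, hf]
  have hbase : (if k0 > 0 then (dhPrefix cover 0).getD (k0 - 1) 0 else 0) = sumLen (cover.take k0) := by
    by_cases h0 : 0 < k0
    · obtain ⟨hk0, _, _⟩ := firstHit_some i cover 0 k0 hf
      rw [if_pos h0, dhPrefix_getD cover 0 (k0 - 1) (by omega)]
      have hsucc : k0 - 1 + 1 = k0 := by omega
      rw [hsucc]; ring
    · have h0' : k0 = 0 := by omega
      simp [h0', sumLen_nil]
  rw [goA_eq, hf]
  simp only [hb, hbase, filter_two, zero_add, mkRet, gt_iff_lt]
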